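-- pv_equiv track=rewrite | github.com/MorganNetherway/GameProjectGroup8 | drawMapFuncs.py | drawMap
-- ===== SOURCE A (Python) =====
-- def drawMap(board):
--     noColumns = 15
--     noRows = 15
--
--     #count will equal column number aka y axis in grid
--     for count in range(0,noColumns):
--         board += " * |" * (noColumns)
--         board += "  "
--         board += "\n"
--         board += "----" * noColumns
--         board += "\n"
--     return(board)
-- ===== SOURCE B (Python) =====
-- def drawMap(board):
--     # Build the grid as a list of lines and join them, instead of
--     # accumulating text row by row onto the board string.
--     cells = "|".join([" * "] * 15) + "|  "
--     dashes = "-" * 60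
--     return board + "\n".join([cells, dashes] * 15) + "\n"
-- ===== Notes on version B (the rewrite author's own statement) =====
-- stated objective: alternative
-- what changed: Instead of A's 15-iteration loop that appends five fragments to the board each pass, B constructs the grid as a list of lines (cell line built by '|'.join over 15 cells, dash line by '-'*60), joins them with newline separators, and appends the result to board in one expression.
import Mathlib
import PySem

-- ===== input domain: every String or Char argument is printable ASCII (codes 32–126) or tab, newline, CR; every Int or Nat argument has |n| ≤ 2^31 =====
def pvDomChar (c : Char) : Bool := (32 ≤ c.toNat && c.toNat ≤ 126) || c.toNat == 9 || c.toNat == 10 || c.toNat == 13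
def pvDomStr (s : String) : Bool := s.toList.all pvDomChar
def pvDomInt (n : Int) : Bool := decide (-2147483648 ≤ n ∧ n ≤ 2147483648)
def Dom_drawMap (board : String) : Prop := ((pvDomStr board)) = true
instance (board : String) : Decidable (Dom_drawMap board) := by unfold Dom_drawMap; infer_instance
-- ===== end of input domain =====

-- B builds the grid as a list of lines ('|'-joined cells, '-'*60) joined by newlines and appended
-- to board at once, instead of A's 15-pass accumulation loop (objective: alternative decomposition).

-- ===== PORT A =====
-- Python's 's * n' string repetition (n a nonnegative literal here).
def pvRep (s : String) : Nat → String
  | 0 => ""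
  | n + 1 => s ++ pvRep s n

def drawMap (board : String) : String :=
  -- for count in range(0, 15): board += " * |"*15; board += "  "; board += "\n"; board += "----"*15; board += "\n"
  (PySem.List.pyRange 0 15 1).foldl
    (fun s _ => ((((s ++ pvRep " * |" 15) ++ "  ") ++ "\n") ++ pvRep "----" 15) ++ "\n")
    board

-- ===== PORT B =====
-- Python's 'sep.join(list)'.
def pvJoin (sep : String) : List String → String
  | [] => ""
  | [x] => x
  | x :: y :: t => x ++ sep ++ pvJoin sep (y :: t)

-- Python's 'list * n' repetition.
def pvListRep (l : List String) : Nat → List String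
  | 0 => []
  | n + 1 => l ++ pvListRep l n

def drawMap_alt (board : String) : String :=
  let cells := pvJoin "|" (List.replicate 15 " * ") ++ "|  "
  let dashes := pvRep "-" 60
  (board ++ pvJoin "\n" (pvListRep [cells, dashes] 15)) ++ "\n"

-- ===== PRECONDITION & SPEC =====
def Spec_drawMap (board : String) (out : String) : Prop := out = drawMap_alt board
instance (board : String) (out : String) : Decidable (Spec_drawMap board out) := by unfold Spec_drawMap; infer_instance

-- ===== CLAIM =====
def Claim_equal_drawMap : Prop := ∀ (board : String), Dom_drawMap board → Spec_drawMap board (drawMap board)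

-- ===== LEMMAS AND PROOFS =====

-- Folding a constant-append step over any list appends the block repeated (length) times.
theorem foldl_const_append (c : String) (l : List Int) :
    ∀ (a : String), l.foldl (fun s _ => s ++ c) a = a ++ pvRep c l.length := by
  induction l with
  | nil => intro a; simp [pvRep]
  | cons h t ih =>
      intro a
      simp only [List.foldl, List.length_cons, pvRep, ih, String.append_assoc]

theorem drawMap_closed (board : String) :
    drawMap board =
      board ++ pvRep (((pvRep " * |" 15 ++ "  ") ++ "\n") ++ (pvRep "----" 15 ++ "\n")) 15 := by
  unfold drawMap
  have hstep : (fun (s : String) (_ : Int) =>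
      ((((s ++ pvRep " * |" 15) ++ "  ") ++ "\n") ++ pvRep "----" 15) ++ "\n")
      = fun (s : String) (_ : Int) =>
        s ++ ((((pvRep " * |" 15 ++ "  ") ++ "\n") ++ (pvRep "----" 15 ++ "\n"))) := by
    funext s _
    simp [String.append_assoc]
  rw [hstep, foldl_const_append]
  rfl

-- The two closed grid texts coincide (kernel evaluation of two literal strings).
set_option maxRecDepth 20000 in
theorem grids_eq :
    pvRep (((pvRep " * |" 15 ++ "  ") ++ "\n") ++ (pvRep "----" 15 ++ "\n")) 15
      = pvJoin "\n" (pvListRep [pvJoin "|" (List.replicate 15 " * ") ++ "|  ", pvRep "-" 60] 15) ++ "\n" := by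
  decide

-- ===== VERDICT =====
theorem drawMap_spec : Claim_equal_drawMap := by
  intro board _
  show drawMap board = drawMap_alt board
  rw [drawMap_closed]
  unfold drawMap_alt
  rw [grids_eq]
  simp [String.append_assoc]
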